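-- pv_equiv track=rewrite | github.com/rani-maklada/Search-Algorithms | search_algorithms.py | successor_funcion
-- ===== SOURCE A (Python) =====
-- from copy import deepcopy
--
-- def successor_funcion(state):
--     # for 3X3 - 12 next states
--     # for 4X4 - 18 next states
--     next_states = []
--     for i in range(len(state) - 1):
--         for j in range(len(state[0])):
--             new_state = deepcopy(state) # Copy array
--             temp = new_state[i][j]
--             new_state[i][j] = new_state[i+1][j]
--             new_state[i+1][j] = temp
--
--             next_states.append(new_state)
--
--     for i in range(len(state)):
--         for j in range(len(state[0])-1):
--             new_state = deepcopy(state) # Copy array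
--             temp = new_state[i][j]
--             new_state[i][j] = new_state[i][j+1]
--             new_state[i][j+1] = temp
--
--             next_states.append(new_state)
--
--     return next_states
-- ===== SOURCE B (Python) =====
-- def _hswaps(row, cols):
--     # all variants of row with one adjacent swap among the first `cols` positions
--     return [row[:j] + [row[j + 1], row[j]] + row[j + 2:] for j in range(cols - 1)]
--
-- def _vert(rows, cols):
--     # neighbors obtained by swapping a column element between two consecutive rows,
--     # by structural recursion on the row list
--     if len(rows) < 2:
--         return []
--     a, b, rest = rows[0], rows[1], rows[2:]
--     here = [[a[:j] + [b[j]] + a[j + 1:],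
--              b[:j] + [a[j]] + b[j + 1:]] + [list(r) for r in rest]
--             for j in range(cols)]
--     return here + [[list(a)] + g for g in _vert(rows[1:], cols)]
--
-- def _horiz(rows, cols):
--     if not rows:
--         return []
--     a, rest = rows[0], rows[1:]
--     return [[na] + [list(r) for r in rest] for na in _hswaps(a, cols)] \
--         + [[list(a)] + g for g in _horiz(rest, cols)]
--
-- def successor_funcion(state):
--     cols = len(state[0]) if state else 0
--     return _vert(state, cols) + _horiz(state, cols)
-- ===== Notes on version B (the rewrite author's own statement) =====
-- stated objective: alternative
-- what changed: B never copies-and-mutates: it builds each neighbor grid by pure construction (slice-and-concatenate rows) using structural recursion over the row list, with no index enumeration over rows and no deepcopy, where A enumerates (i,j) indices and mutates deep copies in place.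
import Mathlib
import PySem

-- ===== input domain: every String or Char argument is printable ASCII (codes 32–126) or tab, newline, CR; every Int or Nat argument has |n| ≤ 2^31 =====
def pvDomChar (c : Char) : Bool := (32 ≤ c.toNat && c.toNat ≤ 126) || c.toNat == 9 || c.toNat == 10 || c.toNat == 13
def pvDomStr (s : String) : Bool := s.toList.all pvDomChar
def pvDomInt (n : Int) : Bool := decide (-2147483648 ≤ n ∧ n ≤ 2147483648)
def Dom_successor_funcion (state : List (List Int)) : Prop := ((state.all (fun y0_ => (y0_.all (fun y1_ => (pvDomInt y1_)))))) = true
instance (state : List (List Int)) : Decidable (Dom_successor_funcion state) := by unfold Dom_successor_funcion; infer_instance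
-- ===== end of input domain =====

-- B builds each neighbor grid by pure construction (slice-and-concatenate rows) with structural
-- recursion over the row list — no index enumeration over rows, no copy-then-mutate.

-- ===== PORT A =====
-- vertical swap of A's first loop body: deepcopy, temp = g[i][j]; g[i][j] = g[i+1][j]; g[i+1][j] = temp
def aSwapV (state : List (List Int)) (i j : Nat) : List (List Int) :=
  let temp := (state.getD i []).getD j 0
  let v := (state.getD (i+1) []).getD j 0
  let s1 := state.set i ((state.getD i []).set j v)
  s1.set (i+1) ((s1.getD (i+1) []).set j temp)

-- horizontal swap of A's second loop body
def aSwapH (state : List (List Int)) (i j : Nat) : List (List Int) :=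
  let temp := (state.getD i []).getD j 0
  let v := (state.getD i []).getD (j+1) 0
  let s1 := state.set i ((state.getD i []).set j v)
  s1.set i ((s1.getD i []).set (j+1) temp)

def successor_funcion (state : List (List Int)) : List (List (List Int)) :=
  let nextStates : List (List (List Int)) := []
  let nextStates := (List.range (state.length - 1)).foldl (fun acc i =>
      (List.range (state.getD 0 []).length).foldl (fun acc j => acc ++ [aSwapV state i j]) acc) nextStates
  let nextStates := (List.range state.length).foldl (fun acc i =>
      (List.range ((state.getD 0 []).length - 1)).foldl (fun acc j => acc ++ [aSwapH state i j]) acc) nextStates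
  nextStates

-- ===== PORT B =====
-- Source B's _hswaps: row[:j] + [row[j+1], row[j]] + row[j+2:] for j in range(cols-1)
def bHSwaps (row : List Int) (cols : Nat) : List (List Int) :=
  (List.range (cols - 1)).map (fun j =>
    row.take j ++ [row.getD (j+1) 0, row.getD j 0] ++ row.drop (j+2))

-- Source B's _vert: structural recursion on the row list
def bVert : List (List Int) → Nat → List (List (List Int))
  | a :: b :: rest, cols =>
      ((List.range cols).map (fun j =>
        [a.take j ++ [b.getD j 0] ++ a.drop (j+1),
         b.take j ++ [a.getD j 0] ++ b.drop (j+1)] ++ rest.map (fun r => r))) ++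
      (bVert (b :: rest) cols).map (fun g => a :: g)
  | _, _ => []

-- Source B's _horiz: structural recursion on the row list
def bHoriz : List (List Int) → Nat → List (List (List Int))
  | [], _ => []
  | a :: rest, cols =>
      (bHSwaps a cols).map (fun na => na :: rest.map (fun r => r)) ++
      (bHoriz rest cols).map (fun g => a :: g)

def successor_funcion_alt (state : List (List Int)) : List (List (List Int)) :=
  let cols := (state.getD 0 []).length
  bVert state cols ++ bHoriz state cols

-- ===== PRECONDITION & SPEC =====
-- Pre_ excludes exactly the inputs on which the Python A raises IndexError:
-- ragged grids with a row shorter than the first row (A indexes row[j] for j < len(state[0])).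
def Pre_successor_funcion (state : List (List Int)) : Prop :=
  ∀ row ∈ state, (state.getD 0 []).length ≤ row.length
instance (state : List (List Int)) : Decidable (Pre_successor_funcion state) := by unfold Pre_successor_funcion; infer_instance

def pvWitness_successor_funcion : List (List Int) := [[1, 2], [3, 4]]

def Spec_successor_funcion (state : List (List Int)) (out : List (List (List Int))) : Prop := out = successor_funcion_alt state
instance (state : List (List Int)) (out : List (List (List Int))) : Decidable (Spec_successor_funcion state out) := by unfold Spec_successor_funcion; infer_instance

-- ===== CLAIM =====
def Claim_equal_successor_funcion : Prop := ∀ (state : List (List Int)), Dom_successor_funcion state → Pre_successor_funcion state → Spec_successor_funcion state (successor_funcion state)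

-- ===== LEMMAS AND PROOFS =====

-- in-place set of a list element, written as B's slice-and-concatenate construction
theorem set_as_slices (a : List Int) (j : Nat) (h : j < a.length) (v : Int) :
    a.set j v = a.take j ++ [v] ++ a.drop (j+1) := by
  simpa using List.set_eq_take_cons_drop v h

-- A's double set on one row, written as B's slice-and-concatenate adjacent swap
theorem rowH_as_slices (a : List Int) (j : Nat) (h : j + 1 < a.length) :
    (a.set j (a.getD (j+1) 0)).set (j+1) (a.getD j 0)
      = a.take j ++ [a.getD (j+1) 0, a.getD j 0] ++ a.drop (j+2) := by
  have h1 : j < a.length := by omega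
  apply List.ext_getElem
  · simp; omega
  · intro i hi hi'
    have hx : a.getD (j+1) 0 = a[j+1] := List.getD_eq_getElem a 0 h
    have hy : a.getD j 0 = a[j] := List.getD_eq_getElem a 0 h1
    simp only [List.getElem_set, List.getElem_append, List.length_append,
      List.length_take, List.getElem_take, List.getElem_drop, List.getElem_cons,
      List.length_cons, List.length_nil, hx, hy]
    split_ifs <;> simp_all <;> first | rfl | omega | (congr 1; omega)

-- A's vertical body shifts through cons
theorem aSwapV_cons (a : List Int) (t : List (List Int)) (i j : Nat) :
    aSwapV (a :: t) (i+1) j = a :: aSwapV t i j := by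
  simp [aSwapV, List.getD]

theorem aSwapV_zero (a b : List Int) (rest : List (List Int)) (j : Nat) :
    aSwapV (a :: b :: rest) 0 j
      = (a.set j (b.getD j 0)) :: (b.set j (a.getD j 0)) :: rest := rfl

theorem aSwapH_cons (a : List Int) (t : List (List Int)) (i j : Nat) :
    aSwapH (a :: t) (i+1) j = a :: aSwapH t i j := by
  simp [aSwapH, List.getD]

theorem aSwapH_zero (a : List Int) (rest : List (List Int)) (j : Nat) :
    aSwapH (a :: rest) 0 j
      = ((a.set j (a.getD (j+1) 0)).set (j+1) (a.getD j 0)) :: rest := rfl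

-- B's recursive vertical pass = A's index enumeration
theorem bVert_eq (rows : List (List Int)) (cols : Nat)
    (h : ∀ r ∈ rows, cols ≤ r.length) :
    bVert rows cols
      = (List.range (rows.length - 1)).flatMap (fun i => (List.range cols).map (aSwapV rows i)) := by
  induction rows with
  | nil => simp [bVert]
  | cons a t ih =>
    match t with
    | [] => simp [bVert]
    | b :: rest =>
      have ha : cols ≤ a.length := h a (by simp)
      have hb : cols ≤ b.length := h b (by simp)
      have htail : ∀ r ∈ b :: rest, cols ≤ r.length := fun r hr => h r (List.mem_cons_of_mem _ hr)
      have hlen : (a :: b :: rest).length - 1 = (rest.length + 1 - 1) + 1 := by simp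
      rw [hlen, List.range_succ_eq_map, List.flatMap_cons, List.flatMap_map]
      show bVert (a :: b :: rest) cols = _
      rw [bVert]
      congr 1
      · apply List.map_congr_left
        intro j hj
        have hj' : j < cols := List.mem_range.mp hj
        rw [aSwapV_zero, set_as_slices a j (lt_of_lt_of_le hj' ha),
            set_as_slices b j (lt_of_lt_of_le hj' hb)]
        simp
      · rw [ih htail]
        rw [List.map_flatMap]
        symm
        apply List.flatMap_congr
        intro i _
        rw [List.map_map]
        apply List.map_congr_left
        intro j _
        exact aSwapV_cons a (b :: rest) i j

-- B's recursive horizontal pass = A's index enumeration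
theorem bHoriz_eq (rows : List (List Int)) (cols : Nat)
    (h : ∀ r ∈ rows, cols ≤ r.length) :
    bHoriz rows cols
      = (List.range rows.length).flatMap (fun i => (List.range (cols - 1)).map (aSwapH rows i)) := by
  induction rows with
  | nil => simp [bHoriz]
  | cons a rest ih =>
    have ha : cols ≤ a.length := h a (by simp)
    have htail : ∀ r ∈ rest, cols ≤ r.length := fun r hr => h r (List.mem_cons_of_mem _ hr)
    rw [List.length_cons, List.range_succ_eq_map, List.flatMap_cons, List.flatMap_map]
    rw [bHoriz]
    congr 1
    · rw [bHSwaps, List.map_map]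
      apply List.map_congr_left
      intro j hj
      have hj' : j + 1 < cols := by
        have := List.mem_range.mp hj; omega
      rw [Function.comp_apply, aSwapH_zero,
          rowH_as_slices a j (lt_of_lt_of_le hj' ha)]
      simp
    · rw [ih htail, List.map_flatMap]
      symm
      apply List.flatMap_congr
      intro i _
      rw [List.map_map]
      apply List.map_congr_left
      intro j _
      exact aSwapH_cons a rest i j

theorem successor_funcion_eq_alt (state : List (List Int))
    (h : Pre_successor_funcion state) :
    successor_funcion state = successor_funcion_alt state := by
  unfold successor_funcion successor_funcion_alt
  simp only [PySem.List.foldl_append_singleton_eq_map, PySem.List.foldl_append_eq_flatMap,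
    List.nil_append]
  rw [bVert_eq state _ h, bHoriz_eq state _ h]

-- ===== VERDICT =====
theorem successor_funcion_spec : Claim_equal_successor_funcion := by
  intro state _ hpre
  exact successor_funcion_eq_alt state hpre
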